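-- pv_equiv track=rewrite | github.com/roeibenzion/Advanced-topics-in-audio-processing-using-deep-learning | HW2/CTC.py | fill_with_blanks
-- ===== SOURCE A (Python) =====
-- import itertools
--
-- def fill_with_blanks(word):
--     """
--     Fill the word with '^' in every possible way to make it of length 5.
--
--     Args:
--     - word (str): The word.
--
--     Returns:
--     - filled_words (list): List of all possible words filled with '^'.
--     """
--     # Determine how many '^' are needed to fill the word to length 5
--     blanks_needed = 5 - len(word)
--
--     # Generate all possible positions to insert '^' into the word
--     possible_positions = list(itertools.combinations(range(5), blanks_needed))
--
--     # Fill the word with '^' at each possible position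
--     filled_words = []
--     for positions in possible_positions:
--         filled_word = ''
--         index = 0
--         for i in range(5):
--             if i in positions:
--                 filled_word += '^'
--             else:
--                 filled_word += word[index]
--                 index += 1
--         filled_words.append(filled_word)
--     return filled_words
-- ===== SOURCE B (Python) =====
-- def fill_with_blanks(word):
--     """Recursive slot-by-slot builder: place '^' (blank-first) or the next
--     character of word at each position until both are exhausted."""
--     blanks = 5 - len(word)
--     if blanks < 0:
--         return []
--
--     def go(blanks_left, rest, prefix):
--         if blanks_left == 0 and not rest:
--             return [prefix]
--         res = []
--         if blanks_left > 0:
--             res += go(blanks_left - 1, rest, prefix + '^')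
--         if rest:
--             res += go(blanks_left, rest[1:], prefix + rest[0])
--         return res
--
--     return go(blanks, word, '')
-- ===== Notes on version B (the rewrite author's own statement) =====
-- stated objective: alternative
-- what changed: Replaces the enumerate-itertools.combinations-then-fill-by-index approach with a direct recursive slot-by-slot builder that branches blank-first, producing each filled string straight from (blanks left, remaining chars); Pre_ excludes words longer than 5, where A raises ValueError and B returns [].
import Mathlib
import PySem

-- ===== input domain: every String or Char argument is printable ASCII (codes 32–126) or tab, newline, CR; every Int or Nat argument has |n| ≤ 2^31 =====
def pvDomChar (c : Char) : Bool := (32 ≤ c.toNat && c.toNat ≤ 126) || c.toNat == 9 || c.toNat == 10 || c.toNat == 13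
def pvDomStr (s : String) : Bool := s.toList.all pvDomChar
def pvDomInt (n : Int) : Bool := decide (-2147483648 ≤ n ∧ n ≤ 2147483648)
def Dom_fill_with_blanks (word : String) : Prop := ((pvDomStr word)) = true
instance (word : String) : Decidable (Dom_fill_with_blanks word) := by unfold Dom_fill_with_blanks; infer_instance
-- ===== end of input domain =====

-- B replaces the combinations-then-fill enumeration by a recursive slot-by-slot
-- builder (blank-first branching); objective: alternative algorithm, same results.

-- ===== PORT A =====
-- port of itertools.combinations(l, r) in its lexicographic order
def pvCombos : List Nat → Nat → List (List Nat)
  | _, 0 => [[]]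
  | [], _+1 => []
  | x :: xs, r+1 => ((pvCombos xs r).map (x :: ·)) ++ pvCombos xs (r+1)

-- one step of A's inner loop (state: characters built so far, index into word);
-- word[index] raising IndexError is unreachable when Pre_ holds, so getD's default is never used
def pvStep (cs : List Char) (ps : List Nat) (st : List Char × Nat) (i : Nat) : List Char × Nat :=
  if i ∈ ps then (st.1 ++ ['^'], st.2)
  else (st.1 ++ [cs.getD st.2 ' '], st.2 + 1)

def fill_with_blanks (word : String) : List String :=
  let blanks : Int := 5 - PySem.Str.len word
  let poss := pvCombos (List.range 5) blanks.toNat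
  poss.foldl
    (fun acc ps =>
      acc ++ [String.ofList ((List.range 5).foldl (pvStep word.toList ps) ([], 0)).1]) []

-- ===== PORT B =====
-- slot-by-slot builder: at each slot try '^' first (if blanks remain), then the next word char
def pvGo : Nat → List Char → List Char → List String
  | 0, [], p => [String.ofList p]
  | b+1, rest, p =>
      pvGo b rest (p ++ ['^']) ++
        (match rest with
          | [] => []
          | c :: rs => pvGo (b+1) rs (p ++ [c]))
  | 0, c :: rs, p => pvGo 0 rs (p ++ [c])

def fill_with_blanks_alt (word : String) : List String :=
  let blanks : Int := 5 - PySem.Str.len word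
  if blanks < 0 then [] else pvGo blanks.toNat word.toList []

-- ===== PRECONDITION & SPEC =====
-- Pre_ excludes words longer than 5, on which A raises ValueError (combinations with negative r)
def Pre_fill_with_blanks (word : String) : Prop := word.toList.length ≤ 5
instance (word : String) : Decidable (Pre_fill_with_blanks word) := by
  unfold Pre_fill_with_blanks; infer_instance

def pvWitness_fill_with_blanks : String := "ab"

def Spec_fill_with_blanks (word : String) (out : List String) : Prop := out = fill_with_blanks_alt word
instance (word : String) (out : List String) : Decidable (Spec_fill_with_blanks word out) := by unfold Spec_fill_with_blanks; infer_instance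

-- ===== CLAIM (what is proved, stated in full; the proofs are below) =====
def Claim_equal_fill_with_blanks : Prop := ∀ (word : String), Dom_fill_with_blanks word → Pre_fill_with_blanks word → Spec_fill_with_blanks word (fill_with_blanks word)

-- ===== LEMMAS AND PROOFS =====

theorem pvCombos_map (f : Nat → Nat) :
    ∀ (l : List Nat) (r : Nat), pvCombos (l.map f) r = (pvCombos l r).map (List.map f)
  | _, 0 => by simp [pvCombos]
  | [], _+1 => by simp [pvCombos]
  | x :: xs, r+1 => by
      simp [pvCombos, pvCombos_map f xs r, pvCombos_map f xs (r+1), List.map_map,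
        Function.comp_def]

theorem pvCombos_nil_of_lt :
    ∀ (l : List Nat) (r : Nat), l.length < r → pvCombos l r = []
  | [], _+1, _ => rfl
  | x :: xs, r+1, h => by
      have h1 : xs.length < r := by simp at h; omega
      have h2 : xs.length < r+1 := Nat.lt_succ_of_lt h1
      simp [pvCombos, pvCombos_nil_of_lt xs r h1, pvCombos_nil_of_lt xs (r+1) h2]

theorem pvFold_shift (cs : List Char) (ps' ps : List Nat)
    (h : ∀ j, (j+1 ∈ ps') ↔ j ∈ ps) :
    ∀ (l : List Nat) (st : List Char × Nat),
      (l.map (fun x => x + 1)).foldl (pvStep cs ps') st = l.foldl (pvStep cs ps) st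
  | [], _ => rfl
  | j :: l, st => by
      have hj := h j
      simp only [List.map_cons, List.foldl_cons]
      rw [show pvStep cs ps' st (j+1) = pvStep cs ps st j by
        simp only [pvStep]; by_cases hm : j ∈ ps
        · rw [if_pos hm, if_pos (hj.mpr hm)]
        · rw [if_neg hm, if_neg (fun hc => hm (hj.mp hc))]]
      exact pvFold_shift cs ps' ps h l _

theorem pvFold_drop (c : Char) (cs : List Char) (ps : List Nat) :
    ∀ (l : List Nat) (s : List Char) (i : Nat),
      l.foldl (pvStep (c :: cs) ps) (s, i+1) =
        ((l.foldl (pvStep cs ps) (s, i)).1, (l.foldl (pvStep cs ps) (s, i)).2 + 1)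
  | [], _, _ => rfl
  | j :: l, s, i => by
      simp only [List.foldl_cons, pvStep]
      by_cases hm : j ∈ ps
      · rw [if_pos hm, if_pos hm]
        exact pvFold_drop c cs ps l _ i
      · rw [if_neg hm, if_neg hm]
        simp only [List.getD_cons_succ]
        exact pvFold_drop c cs ps l _ (i+1)

theorem pvFoldl_append_singleton {α β : Type} (f : α → β) :
    ∀ (l : List α) (acc : List β),
      l.foldl (fun a x => a ++ [f x]) acc = acc ++ l.map f
  | [], acc => by simp
  | x :: l, acc => by simp [pvFoldl_append_singleton f l]

theorem pvMain : ∀ (n b : Nat) (cs : List Char) (p : List Char), b + cs.length = n →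
    (pvCombos (List.range n) b).map
      (fun ps => String.ofList ((List.range n).foldl (pvStep cs ps) (p, 0)).1) = pvGo b cs p
  | 0, b, cs, p, h => by
      have hb : b = 0 := by omega
      have hcs : cs = [] := by
        cases cs with
        | nil => rfl
        | cons c cs => simp at h
      subst hb; subst hcs
      simp [pvCombos, pvGo]
  | n+1, b, cs, p, h => by
      simp only [List.range_succ_eq_map]
      cases b with
      | zero =>
        cases cs with
        | nil => simp at h
        | cons c cs =>
          have hn : (0:Nat) + cs.length = n := by simp at h; omega
          simp only [pvCombos, List.map_cons, List.map_nil, List.foldl_cons]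
          rw [show pvStep (c :: cs) [] (p, 0) 0 = (p ++ [c], 1) by simp [pvStep]]
          rw [pvFold_shift (c :: cs) [] [] (by simp) (List.range n) (p ++ [c], 1)]
          rw [pvFold_drop c cs [] (List.range n) (p ++ [c]) 0]
          have := pvMain n 0 cs (p ++ [c]) hn
          simp only [pvCombos, List.map_cons, List.map_nil] at this
          rw [this]
          simp [pvGo]
      | succ b =>
        have key1 : ∀ q ∈ pvCombos (List.range n) b,
            String.ofList (((0 :: (List.range n).map (fun x => x + 1)).foldl
                (pvStep cs (0 :: q.map (fun x => x + 1))) (p, 0)).1)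
              = String.ofList (((List.range n).foldl (pvStep cs q) (p ++ ['^'], 0)).1) := by
          intro q _
          simp only [List.foldl_cons]
          rw [show pvStep cs (0 :: q.map (fun x => x + 1)) (p, 0) 0 = (p ++ ['^'], 0) by
            simp [pvStep]]
          rw [pvFold_shift cs (0 :: q.map (fun x => x + 1)) q (by intro j; simp)
            (List.range n) (p ++ ['^'], 0)]
        simp only [pvCombos, pvCombos_map (fun x => x + 1), List.map_append, List.map_map,
          Function.comp_def]
        rw [List.map_congr_left key1, pvMain n b cs (p ++ ['^']) (by omega)]
        cases cs with
        | nil =>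
          have hb : n < b + 1 := by simp at h; omega
          rw [pvCombos_nil_of_lt (List.range n) (b+1) (by simpa using hb)]
          simp [pvGo]
        | cons c cs =>
          have hn : (b+1) + cs.length = n := by simp at h; omega
          have key2 : ∀ q ∈ pvCombos (List.range n) (b+1),
              String.ofList (((0 :: (List.range n).map (fun x => x + 1)).foldl
                  (pvStep (c :: cs) (q.map (fun x => x + 1))) (p, 0)).1)
                = String.ofList (((List.range n).foldl (pvStep cs q) (p ++ [c], 0)).1) := by
            intro q _
            simp only [List.foldl_cons]
            rw [show pvStep (c :: cs) (q.map (fun x => x + 1)) (p, 0) 0 = (p ++ [c], 1) by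
              simp [pvStep]]
            rw [pvFold_shift (c :: cs) (q.map (fun x => x + 1)) q (by intro j; simp)
              (List.range n) (p ++ [c], 1)]
            rw [pvFold_drop c cs q (List.range n) (p ++ [c]) 0]
          rw [List.map_congr_left key2, pvMain n (b+1) cs (p ++ [c]) hn]
          simp [pvGo]

-- ===== VERDICT (by name: the statement is the Claim_ definition above) =====
theorem fill_with_blanks_spec : Claim_equal_fill_with_blanks := by
  intro word _ hpre
  unfold Pre_fill_with_blanks at hpre
  unfold Spec_fill_with_blanks fill_with_blanks fill_with_blanks_alt
  have hlen : PySem.Str.len word = (word.toList.length : Int) := by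
    simp [PySem.Str.len_eq]
  rw [hlen]
  rw [if_neg (by omega)]
  rw [pvFoldl_append_singleton]
  simp only [List.nil_append]
  exact pvMain 5 ((5 - (word.toList.length : Int)).toNat) word.toList [] (by omega)
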